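-- pv_equiv track=rewrite | github.com/jhaaaa/oldestlight | solar_lattice.py | build_enriched
-- ===== SOURCE A (Python) =====
-- VOWELS_STR = "AEIOU"
--
-- CONSONANTS_STR = "BCDFGHJKLMNPQRSTVWXYZ"
--
-- def build_enriched(letters: str):
--     """
--     Build the vowel-injected stream and return position maps.
--
--     Returns:
--         enriched      : str — the full injected letter stream (uppercase)
--         raw_to_enr    : list[int] — raw index i → first enriched index for that raw letter
--         enr_to_raw    : list[int|None] — enriched index j → raw index (None if injected)
--         enr_is_inj    : list[bool] — True if enriched[j] was injected (not in signal)
--     """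
--     upper = letters.upper()
--     enriched_chars = []
--     raw_to_enr = []
--     enr_to_raw = []
--     enr_is_inj = []
--
--     run = 0
--     for i, c in enumerate(upper):
--         # Record where this raw letter lands in enriched
--         raw_to_enr.append(len(enriched_chars))
--         enriched_chars.append(c)
--         enr_to_raw.append(i)
--         enr_is_inj.append(False)
--
--         if c in CONSONANTS_STR:
--             run += 1
--             if run >= 2:
--                 v = VOWELS_STR[i % 5]
--                 enriched_chars.append(v)
--                 enr_to_raw.append(None)
--                 enr_is_inj.append(True)
--                 run = 0
--         else:
--             run = 0
--
--     return "".join(enriched_chars), raw_to_enr, enr_to_raw, enr_is_inj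
-- ===== SOURCE B (Python) =====
-- VOWELS_STR = "AEIOU"
--
-- CONSONANTS_STR = "BCDFGHJKLMNPQRSTVWXYZ"
--
-- def build_enriched(letters: str):
--     """Plan-then-derive: one pass decides, per raw letter, whether a vowel is
--     injected after it (a list of (char, vowel-or-None) blocks); the enriched
--     stream and all three position maps are then derived from the blocks."""
--     upper = letters.upper()
--     blocks = []
--     run = 0
--     for i, c in enumerate(upper):
--         run = run + 1 if c in CONSONANTS_STR else 0
--         if run >= 2:
--             blocks.append((c, VOWELS_STR[i % 5]))
--             run = 0
--         else:
--             blocks.append((c, None))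
--     enriched = "".join(c if v is None else c + v for c, v in blocks)
--     raw_to_enr = []
--     pos = 0
--     for c, v in blocks:
--         raw_to_enr.append(pos)
--         pos += 1 if v is None else 2
--     enr_to_raw = []
--     enr_is_inj = []
--     for i, (c, v) in enumerate(blocks):
--         if v is None:
--             enr_to_raw.append(i)
--             enr_is_inj.append(False)
--         else:
--             enr_to_raw.extend([i, None])
--             enr_is_inj.extend([False, True])
--     return enriched, raw_to_enr, enr_to_raw, enr_is_inj
-- ===== Notes on version B (the rewrite author's own statement) =====
-- stated objective: alternative
-- what changed: A builds the enriched stream and all three maps in one fused loop with interleaved appends; B first plans the injection as a list of (char, optional-vowel) blocks in one pass, then derives the enriched string, raw_to_enr (by accumulating block widths), enr_to_raw and enr_is_inj from the blocks in separate passes.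
import Mathlib
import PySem

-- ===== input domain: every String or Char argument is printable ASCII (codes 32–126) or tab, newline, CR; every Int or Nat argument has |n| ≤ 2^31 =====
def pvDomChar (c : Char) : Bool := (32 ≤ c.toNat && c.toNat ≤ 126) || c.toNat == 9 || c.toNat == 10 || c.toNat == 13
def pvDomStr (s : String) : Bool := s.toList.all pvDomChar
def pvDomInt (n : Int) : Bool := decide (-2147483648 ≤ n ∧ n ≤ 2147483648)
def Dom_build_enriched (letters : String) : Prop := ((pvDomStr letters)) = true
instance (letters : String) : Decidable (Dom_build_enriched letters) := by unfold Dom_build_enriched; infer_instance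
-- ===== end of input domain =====

-- B plans the injection as (char, optional vowel) blocks in one pass, then derives the
-- enriched string and the three maps from the blocks in separate passes (alternative
-- decomposition of A's fused four-list loop; same O(n) cost).

-- ===== PORT A =====
def pvVowels : List Char := "AEIOU".toList
def pvConsonants : List Char := "BCDFGHJKLMNPQRSTVWXYZ".toList

-- A's fused loop: state is the four lists plus the consonant-run counter; i is the
-- enumerate index (a Nat, cast to Int where Python stores it).
def pvLoopA : List Char → Nat → Int →
    List Char → List Int → List (Option Int) → List Bool →
    List Char × List Int × List (Option Int) × List Bool
  | [], _, _, ec, r2e, e2r, inj => (ec, r2e, e2r, inj)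
  | c :: cs, i, run, ec, r2e, e2r, inj =>
      let r2e' := r2e ++ [(ec.length : Int)]
      let ec' := ec ++ [c]
      let e2r' := e2r ++ [some (i : Int)]
      let inj' := inj ++ [false]
      if PySem.Chars.isIn [c] pvConsonants then
        let run' := run + 1
        if run' ≥ 2 then
          let v := PySem.List.pyGetD pvVowels ((i % 5 : Nat) : Int) 'A'
          pvLoopA cs (i + 1) 0 (ec' ++ [v]) r2e' (e2r' ++ [none]) (inj' ++ [true])
        else
          pvLoopA cs (i + 1) run' ec' r2e' e2r' inj'
      else
        pvLoopA cs (i + 1) 0 ec' r2e' e2r' inj'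

def build_enriched (letters : String) : String × List Int × List (Option Int) × List Bool :=
  let upper := (PySem.Str.upper letters).toList
  let (ec, r2e, e2r, inj) := pvLoopA upper 0 0 [] [] [] []
  (String.ofList ec, r2e, e2r, inj)

-- ===== PORT B =====
-- pass 1: the injection plan — one block (c, none) or (c, some vowel) per raw letter.
def pvBlocksLoop : List Char → Nat → Int → List (Char × Option Char) → List (Char × Option Char)
  | [], _, _, acc => acc
  | c :: cs, i, run, acc =>
      let run' := if PySem.Chars.isIn [c] pvConsonants then run + 1 else 0
      if run' ≥ 2 then
        pvBlocksLoop cs (i + 1) 0 (acc ++ [(c, some (PySem.List.pyGetD pvVowels ((i % 5 : Nat) : Int) 'A'))])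
      else
        pvBlocksLoop cs (i + 1) run' (acc ++ [(c, none)])

-- "".join(c if v is None else c + v for c, v in blocks)
def pvJoinLoop : List (Char × Option Char) → List Char → List Char
  | [], acc => acc
  | (c, none) :: bs, acc => pvJoinLoop bs (acc ++ [c])
  | (c, some v) :: bs, acc => pvJoinLoop bs (acc ++ [c, v])

-- raw_to_enr: running position, advanced by the block's width (1 or 2).
def pvR2eLoop : List (Char × Option Char) → Int → List Int → List Int
  | [], _, acc => acc
  | (_, none) :: bs, pos, acc => pvR2eLoop bs (pos + 1) (acc ++ [pos])
  | (_, some _) :: bs, pos, acc => pvR2eLoop bs (pos + 2) (acc ++ [pos])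

-- enr_to_raw and enr_is_inj over enumerate(blocks).
def pvE2rInjLoop : List (Char × Option Char) → Nat →
    List (Option Int) → List Bool → List (Option Int) × List Bool
  | [], _, e2r, inj => (e2r, inj)
  | (_, none) :: bs, i, e2r, inj => pvE2rInjLoop bs (i + 1) (e2r ++ [some (i : Int)]) (inj ++ [false])
  | (_, some _) :: bs, i, e2r, inj =>
      pvE2rInjLoop bs (i + 1) (e2r ++ [some (i : Int), none]) (inj ++ [false, true])

def build_enriched_alt (letters : String) : String × List Int × List (Option Int) × List Bool :=
  let upper := (PySem.Str.upper letters).toList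
  let blocks := pvBlocksLoop upper 0 0 []
  let enriched := String.ofList (pvJoinLoop blocks [])
  let raw_to_enr := pvR2eLoop blocks 0 []
  let (e2r, inj) := pvE2rInjLoop blocks 0 [] []
  (enriched, raw_to_enr, e2r, inj)

-- ===== PRECONDITION & SPEC =====
def Spec_build_enriched (letters : String) (out : String × List Int × List (Option Int) × List Bool) : Prop := out = build_enriched_alt letters
instance (letters : String) (out : String × List Int × List (Option Int) × List Bool) : Decidable (Spec_build_enriched letters out) := by unfold Spec_build_enriched; infer_instance

-- ===== CLAIM (what is proved, stated in full; the proofs are below) =====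
def Claim_equal_build_enriched : Prop := ∀ (letters : String), Dom_build_enriched letters → Spec_build_enriched letters (build_enriched letters)

-- ===== LEMMAS AND PROOFS =====

-- pure (cons-form) versions of B's passes, to state the invariants against
def pvBlocks : List Char → Nat → Int → List (Char × Option Char)
  | [], _, _ => []
  | c :: cs, i, run =>
      let run' := if PySem.Chars.isIn [c] pvConsonants then run + 1 else 0
      if run' ≥ 2 then
        (c, some (PySem.List.pyGetD pvVowels ((i % 5 : Nat) : Int) 'A')) :: pvBlocks cs (i + 1) 0
      else
        (c, none) :: pvBlocks cs (i + 1) run'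

def pvJoin : List (Char × Option Char) → List Char
  | [] => []
  | (c, none) :: bs => c :: pvJoin bs
  | (c, some v) :: bs => c :: v :: pvJoin bs

def pvR2e : List (Char × Option Char) → Int → List Int
  | [], _ => []
  | (_, none) :: bs, pos => pos :: pvR2e bs (pos + 1)
  | (_, some _) :: bs, pos => pos :: pvR2e bs (pos + 2)

def pvE2r : List (Char × Option Char) → Nat → List (Option Int)
  | [], _ => []
  | (_, none) :: bs, i => some (i : Int) :: pvE2r bs (i + 1)
  | (_, some _) :: bs, i => some (i : Int) :: none :: pvE2r bs (i + 1)

def pvInj : List (Char × Option Char) → List Bool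
  | [] => []
  | (_, none) :: bs => false :: pvInj bs
  | (_, some _) :: bs => false :: true :: pvInj bs

theorem pvBlocksLoop_eq (cs : List Char) : ∀ (i : Nat) (run : Int) (acc : List (Char × Option Char)),
    pvBlocksLoop cs i run acc = acc ++ pvBlocks cs i run := by
  induction cs with
  | nil => intro i run acc; simp [pvBlocksLoop, pvBlocks]
  | cons c cs ih =>
    intro i run acc
    simp only [pvBlocksLoop, pvBlocks]
    split <;> split <;> simp [ih]

theorem pvJoinLoop_eq (bs : List (Char × Option Char)) : ∀ (acc : List Char),
    pvJoinLoop bs acc = acc ++ pvJoin bs := by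
  induction bs with
  | nil => intro acc; simp [pvJoinLoop, pvJoin]
  | cons b bs ih =>
    intro acc
    obtain ⟨c, v⟩ := b
    cases v <;> simp [pvJoinLoop, pvJoin, ih]

theorem pvR2eLoop_eq (bs : List (Char × Option Char)) : ∀ (pos : Int) (acc : List Int),
    pvR2eLoop bs pos acc = acc ++ pvR2e bs pos := by
  induction bs with
  | nil => intro pos acc; simp [pvR2eLoop, pvR2e]
  | cons b bs ih =>
    intro pos acc
    obtain ⟨c, v⟩ := b
    cases v <;> simp [pvR2eLoop, pvR2e, ih]

theorem pvE2rInjLoop_eq (bs : List (Char × Option Char)) :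
    ∀ (i : Nat) (e2r : List (Option Int)) (inj : List Bool),
    pvE2rInjLoop bs i e2r inj = (e2r ++ pvE2r bs i, inj ++ pvInj bs) := by
  induction bs with
  | nil => intro i e2r inj; simp [pvE2rInjLoop, pvE2r, pvInj]
  | cons b bs ih =>
    intro i e2r inj
    obtain ⟨c, v⟩ := b
    cases v <;> simp [pvE2rInjLoop, pvE2r, pvInj, ih]

-- the main invariant: A's fused loop equals B's blocks followed by the four derivations
theorem pvLoopA_eq (cs : List Char) :
    ∀ (i : Nat) (run : Int) (ec : List Char) (r2e : List Int)
      (e2r : List (Option Int)) (inj : List Bool),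
    pvLoopA cs i run ec r2e e2r inj =
      (ec ++ pvJoin (pvBlocks cs i run),
       r2e ++ pvR2e (pvBlocks cs i run) (ec.length : Int),
       e2r ++ pvE2r (pvBlocks cs i run) i,
       inj ++ pvInj (pvBlocks cs i run)) := by
  induction cs with
  | nil => intro i run ec r2e e2r inj; simp [pvLoopA, pvBlocks, pvJoin, pvR2e, pvE2r, pvInj]
  | cons c cs ih =>
    intro i run ec r2e e2r inj
    simp only [pvLoopA, pvBlocks]
    by_cases hc : PySem.Chars.isIn [c] pvConsonants
    · simp only [hc, if_true]
      by_cases hr : run + 1 ≥ 2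
      · simp only [hr, if_true, ih]
        simp [pvJoin, pvR2e, pvE2r, pvInj]
      · simp only [hr, if_false, ih]
        simp [pvJoin, pvR2e, pvE2r, pvInj]
    · simp only [hc]
      have h0 : ¬ ((0 : Int) ≥ 2) := by omega
      simp only [ih]
      simp [pvJoin, pvR2e, pvE2r, pvInj]

-- ===== VERDICT (by name: the statement is the Claim_ definition above) =====
theorem build_enriched_spec : Claim_equal_build_enriched := by
  intro letters _
  show build_enriched letters = build_enriched_alt letters
  simp only [build_enriched, build_enriched_alt, pvLoopA_eq, pvBlocksLoop_eq,
    pvJoinLoop_eq, pvR2eLoop_eq, pvE2rInjLoop_eq]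
  simp
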